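-- pv_equiv track=rewrite | github.com/reilnur/RogueMon-Revo-Data | scripts/evolution_chain_filter.py | build_evolution_chains
-- ===== SOURCE A (Python) =====
-- def build_evolution_chains(starter_pokemon, evolution_data):
--     """
--     Build complete evolution chains starting from the starter Pokémon.
--     Returns a set of all Pokémon in the evolution chains.
--     """
--     evolution_chain = set(starter_pokemon)
--     to_check = list(starter_pokemon)
--     checked = set()
--
--     while to_check:
--         current = to_check.pop(0)
--
--         if current in checked or current not in evolution_data:
--             continue
--
--         checked.add(current)
--
--         for evolution, _ in evolution_data[current]:
--             evolution_chain.add(evolution)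
--             if evolution not in checked:
--                 to_check.append(evolution)
--
--     return evolution_chain
-- ===== SOURCE B (Python) =====
-- def build_evolution_chains(starter_pokemon, evolution_data):
--     """
--     Build complete evolution chains starting from the starter Pokémon.
--     Returns a set of all Pokémon in the evolution chains.
--     Recursive level-by-level expansion instead of a work queue with pop(0).
--     """
--     chain = set(starter_pokemon)
--     checked = set()
--
--     def expand(frontier):
--         if not frontier:
--             return
--         nxt = []
--         for cur in frontier:
--             if cur in checked or cur not in evolution_data:
--                 continue
--             checked.add(cur)
--             for evo, _ in evolution_data[cur]:
--                 chain.add(evo)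
--                 if evo not in checked:
--                     nxt.append(evo)
--         expand(nxt)
--
--     expand(list(starter_pokemon))
--     return chain
-- ===== Notes on version B (the rewrite author's own statement) =====
-- stated objective: faster
-- what changed: A's iterative work-queue BFS with list.pop(0) is replaced by a recursive level-by-level expansion (no queue, no pop(0)): each call processes one frontier layer and recurses on the next layer.
import Mathlib
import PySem

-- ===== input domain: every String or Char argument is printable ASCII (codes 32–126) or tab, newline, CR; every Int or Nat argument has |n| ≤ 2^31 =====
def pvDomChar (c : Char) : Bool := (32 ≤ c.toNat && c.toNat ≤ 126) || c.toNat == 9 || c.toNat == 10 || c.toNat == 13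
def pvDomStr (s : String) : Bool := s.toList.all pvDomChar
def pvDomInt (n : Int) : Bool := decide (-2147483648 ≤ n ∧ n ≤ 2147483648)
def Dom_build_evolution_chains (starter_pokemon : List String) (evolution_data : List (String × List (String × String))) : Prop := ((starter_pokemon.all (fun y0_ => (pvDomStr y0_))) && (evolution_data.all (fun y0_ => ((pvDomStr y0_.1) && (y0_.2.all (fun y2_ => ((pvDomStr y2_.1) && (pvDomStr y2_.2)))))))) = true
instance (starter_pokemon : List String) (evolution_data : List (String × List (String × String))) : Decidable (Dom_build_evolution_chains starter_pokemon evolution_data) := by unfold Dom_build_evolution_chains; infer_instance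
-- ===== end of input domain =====

-- B replaces A's pop(0) work queue by a recursive level-by-level expansion (iterative BFS queue → recursion on frontier layers); return values are proved equal.

-- ===== PORT A =====
-- number of dict entries whose key is not yet checked: termination measure only
def pvUnchecked (data : List (String × List (String × String))) (checked : List String) : Nat :=
  data.countP (fun kv => decide (kv.1 ∉ checked))

theorem pvUnchecked_le (data : List (String × List (String × String))) (checked checked' : List String)
    (hsub : ∀ x, x ∈ checked → x ∈ checked') :
    pvUnchecked data checked' ≤ pvUnchecked data checked := by
  apply List.countP_mono_left
  intro kv _ h
  simp only [decide_eq_true_eq] at *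
  exact fun hm => h (hsub _ hm)

theorem pvUnchecked_lt (data : List (String × List (String × String))) (checked checked' : List String)
    (c : String) (hsub : ∀ x, x ∈ checked → x ∈ checked') (hc : c ∉ checked) (hc' : c ∈ checked')
    (hk : ∃ kv ∈ data, kv.1 = c) :
    pvUnchecked data checked' < pvUnchecked data checked := by
  induction data with
  | nil => simp at hk
  | cons kv rest ih =>
    simp only [pvUnchecked, List.countP_cons] at *
    by_cases hkc : kv.1 = c
    · have h1 : (decide (kv.1 ∉ checked') : Bool) = false := by simp [hkc, hc']
      have h2 : (decide (kv.1 ∉ checked) : Bool) = true := by simp [hkc, hc]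
      have hle := pvUnchecked_le rest checked checked' hsub
      simp only [pvUnchecked] at hle
      rw [h1, h2]
      simp only [Bool.false_eq_true, if_false, if_true]
      omega
    · have hk' : ∃ kv ∈ rest, kv.1 = c := by
        rcases hk with ⟨kv', hkv', hceq⟩
        rcases List.mem_cons.mp hkv' with rfl | hmem
        · exact absurd hceq hkc
        · exact ⟨kv', hmem, hceq⟩
      have := ih hk'
      by_cases hA : kv.1 ∈ checked'
      · have e1 : (decide (kv.1 ∉ checked') : Bool) = false := by simp [hA]
        rw [e1]
        simp only [Bool.false_eq_true, if_false]
        omega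
      · have hB : kv.1 ∉ checked := fun hm => hA (hsub _ hm)
        rw [decide_eq_true hA, decide_eq_true hB]
        omega

theorem pvDict_contains_exists (data : List (String × List (String × String))) (c : String)
    (h : PySem.Dict.contains (PySem.Dict.mk data) c = true) : ∃ kv ∈ data, kv.1 = c := by
  have : data.any (fun kv => kv.1 == c) = true := h
  simpa [List.any_eq_true] using this

theorem pvSet_step_lt (data : List (String × List (String × String))) (checked : PySem.Set String) (c : String)
    (h1 : PySem.Set.contains checked c = false)
    (h2 : PySem.Dict.contains (PySem.Dict.mk data) c = true) :
    pvUnchecked data (PySem.Set.add checked c) < pvUnchecked data checked := by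
  apply pvUnchecked_lt data checked (PySem.Set.add checked c) c
  · intro x hx; exact (PySem.Set.mem_add checked c x).2 (Or.inl hx)
  · intro hm
    have := (PySem.Set.contains_iff checked c).2 hm
    rw [h1] at this
    exact Bool.noConfusion this
  · exact (PySem.Set.mem_add checked c c).2 (Or.inr rfl)
  · exact pvDict_contains_exists data c h2

-- A, literally: evolution_chain = set(starter); to_check = list(starter); checked = set();
-- while to_check: current = to_check.pop(0); skip if checked/absent; else mark checked and
-- for (evolution, _) in evolution_data[current]: chain.add(evolution); append if unchecked.
def pvInnerA : List (String × String) → PySem.Set String → PySem.Set String → List String → PySem.Set String × List String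
  | [], chain, _, queue => (chain, queue)
  | (e, _) :: rest, chain, checked, queue =>
      pvInnerA rest (PySem.Set.add chain e) checked
        (if PySem.Set.contains checked e then queue else queue ++ [e])

def pvBfs (data : List (String × List (String × String))) :
    List String → PySem.Set String → PySem.Set String → PySem.Set String
  | [], chain, _ => chain
  | current :: rest, chain, checked =>
    if PySem.Set.contains checked current || !(PySem.Dict.contains (PySem.Dict.mk data) current) then
      pvBfs data rest chain checked
    else
      let checked' := PySem.Set.add checked current
      -- evolution_data[current]: guarded by the contains test, so getD is exact here
      let p := pvInnerA (PySem.Dict.getD (PySem.Dict.mk data) current []) chain checked' rest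
      pvBfs data p.2 p.1 checked'
  termination_by to_check _ checked => (pvUnchecked data checked, to_check.length)
  decreasing_by
  · apply Prod.Lex.right; simp
  · apply Prod.Lex.left
    rename_i h
    rw [Bool.or_eq_true, not_or] at h
    apply pvSet_step_lt
    · exact Bool.not_eq_true _ ▸ h.1
    · have := h.2
      simp only [Bool.not_eq_true', Bool.not_eq_false] at this
      exact this

def build_evolution_chains (starter_pokemon : List String) (evolution_data : List (String × List (String × String))) : List String :=
  pvBfs evolution_data starter_pokemon (PySem.Set.ofList starter_pokemon) PySem.Set.empty

-- ===== PORT B =====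
-- B, literally: chain = set(starter); checked = set(); expand(frontier) builds nxt from the
-- current layer's unprocessed entries and recurses; expand(list(starter)); return chain.
def pvInnerB (evs : List (String × String)) (chain : PySem.Set String) (checked : PySem.Set String) (nxt : List String) : PySem.Set String × List String :=
  evs.foldl (fun p e =>
    (PySem.Set.add p.1 e.1, if PySem.Set.contains checked e.1 then p.2 else p.2 ++ [e.1]))
    (chain, nxt)

def pvLayer (data : List (String × List (String × String))) :
    List String → List String → PySem.Set String → PySem.Set String → List String × PySem.Set String × PySem.Set String
  | [], nxt, chain, checked => (nxt, chain, checked)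
  | cur :: rest, nxt, chain, checked =>
    if PySem.Set.contains checked cur || !(PySem.Dict.contains (PySem.Dict.mk data) cur) then
      pvLayer data rest nxt chain checked
    else
      let checked' := PySem.Set.add checked cur
      let p := pvInnerB (PySem.Dict.getD (PySem.Dict.mk data) cur []) chain checked' nxt
      pvLayer data rest p.2 p.1 checked'

theorem pvLayer_measure (data : List (String × List (String × String))) :
    ∀ (f nxt : List String) (chain checked : PySem.Set String),
      pvUnchecked data (pvLayer data f nxt chain checked).2.2 ≤ pvUnchecked data checked ∧
      (pvUnchecked data (pvLayer data f nxt chain checked).2.2 = pvUnchecked data checked →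
        (pvLayer data f nxt chain checked).1 = nxt) := by
  intro f
  induction f with
  | nil => intro nxt chain checked; exact ⟨le_refl _, fun _ => rfl⟩
  | cons cur rest ih =>
    intro nxt chain checked
    have hred : pvLayer data (cur :: rest) nxt chain checked =
        if PySem.Set.contains checked cur || !(PySem.Dict.contains (PySem.Dict.mk data) cur) then
          pvLayer data rest nxt chain checked
        else
          pvLayer data rest
            (pvInnerB (PySem.Dict.getD (PySem.Dict.mk data) cur []) chain (PySem.Set.add checked cur) nxt).2
            (pvInnerB (PySem.Dict.getD (PySem.Dict.mk data) cur []) chain (PySem.Set.add checked cur) nxt).1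
            (PySem.Set.add checked cur) := rfl
    by_cases h : (PySem.Set.contains checked cur || !(PySem.Dict.contains (PySem.Dict.mk data) cur)) = true
    · rw [hred, if_pos h]; exact ih nxt chain checked
    · rw [hred, if_neg h]
      rw [Bool.or_eq_true, not_or] at h
      have h1 : PySem.Set.contains checked cur = false := Bool.not_eq_true _ ▸ h.1
      have h2 : PySem.Dict.contains (PySem.Dict.mk data) cur = true := by
        have := h.2
        simp only [Bool.not_eq_true', Bool.not_eq_false] at this
        exact this
      have hlt := pvSet_step_lt data checked cur h1 h2
      have hih := ih (pvInnerB (PySem.Dict.getD (PySem.Dict.mk data) cur []) chain (PySem.Set.add checked cur) nxt).2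
                    (pvInnerB (PySem.Dict.getD (PySem.Dict.mk data) cur []) chain (PySem.Set.add checked cur) nxt).1
                    (PySem.Set.add checked cur)
      exact ⟨by omega, fun he => absurd he (by omega)⟩

def pvExpand (data : List (String × List (String × String))) :
    List String → PySem.Set String → PySem.Set String → PySem.Set String
  | [], chain, _ => chain
  | cur :: rest, chain, checked =>
    let r := pvLayer data (cur :: rest) [] chain checked
    pvExpand data r.1 r.2.1 r.2.2
  termination_by f _ checked => 2 * pvUnchecked data checked + (if f = [] then 0 else 1)
  decreasing_by
    have hm := pvLayer_measure data (cur :: rest) [] chain checked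
    rcases hm with ⟨hle, heq⟩
    by_cases he : pvUnchecked data (pvLayer data (cur :: rest) [] chain checked).2.2 = pvUnchecked data checked
    · rw [heq he, he]
      simp
    · split <;> omega

def build_evolution_chains_alt (starter_pokemon : List String) (evolution_data : List (String × List (String × String))) : List String :=
  pvExpand evolution_data starter_pokemon (PySem.Set.ofList starter_pokemon) PySem.Set.empty

-- ===== PRECONDITION & SPEC =====
def Spec_build_evolution_chains (starter_pokemon : List String) (evolution_data : List (String × List (String × String))) (out : List String) : Prop := out = build_evolution_chains_alt starter_pokemon evolution_data
instance (starter_pokemon : List String) (evolution_data : List (String × List (String × String))) (out : List String) : Decidable (Spec_build_evolution_chains starter_pokemon evolution_data out) := by unfold Spec_build_evolution_chains; infer_instance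

-- ===== CLAIM (what is proved, stated in full; the proofs are below) =====
def Claim_equal_build_evolution_chains : Prop := ∀ (starter_pokemon : List String) (evolution_data : List (String × List (String × String))), Dom_build_evolution_chains starter_pokemon evolution_data → Spec_build_evolution_chains starter_pokemon evolution_data (build_evolution_chains starter_pokemon evolution_data) 

-- ===== LEMMAS AND PROOFS =====

theorem pvInnerB_eq_pvInnerA (evs : List (String × String)) :
    ∀ (chain checked : PySem.Set String) (nxt : List String),
      pvInnerB evs chain checked nxt = pvInnerA evs chain checked nxt := by
  induction evs with
  | nil => intro chain checked nxt; rfl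
  | cons e rest ih =>
    intro chain checked nxt
    obtain ⟨e1, e2⟩ := e
    simp only [pvInnerB, List.foldl_cons, pvInnerA]
    exact ih _ _ _

theorem pvInnerA_append (evs : List (String × String)) :
    ∀ (chain checked : PySem.Set String) (qa qb : List String),
      pvInnerA evs chain checked (qa ++ qb) =
        ((pvInnerA evs chain checked qb).1, qa ++ (pvInnerA evs chain checked qb).2) := by
  induction evs with
  | nil => intro chain checked qa qb; rfl
  | cons e rest ih =>
    intro chain checked qa qb
    obtain ⟨e1, e2⟩ := e
    by_cases h : PySem.Set.contains checked e1 = true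
    · simp only [pvInnerA, h, if_pos]
      exact ih _ _ _ _
    · simp only [pvInnerA, if_neg h, List.append_assoc]
      exact ih _ _ qa (qb ++ [e1])

theorem pvBfs_layer (data : List (String × List (String × String))) :
    ∀ (frontier tail : List String) (chain checked : PySem.Set String),
      pvBfs data (frontier ++ tail) chain checked =
        pvBfs data (pvLayer data frontier tail chain checked).1
          (pvLayer data frontier tail chain checked).2.1
          (pvLayer data frontier tail chain checked).2.2 := by
  intro frontier
  induction frontier with
  | nil => intro tail chain checked; rfl
  | cons cur rest ih =>
    intro tail chain checked
    by_cases h : (PySem.Set.contains checked cur || !(PySem.Dict.contains (PySem.Dict.mk data) cur)) = true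
    · rw [List.cons_append, pvBfs, if_pos h]
      rw [ih tail chain checked]
      simp only [pvLayer, if_pos h]
    · rw [List.cons_append, pvBfs, if_neg h]
      simp only
      rw [pvInnerA_append]
      rw [← pvInnerB_eq_pvInnerA]
      rw [ih]
      simp only [pvLayer, if_neg h]

theorem pvBfs_eq_pvExpand (data : List (String × List (String × String))) :
    ∀ (frontier : List String) (chain checked : PySem.Set String),
      pvBfs data frontier chain checked = pvExpand data frontier chain checked := by
  intro frontier chain checked
  induction frontier, chain, checked using pvExpand.induct data with
  | case1 chain checked => rw [pvBfs, pvExpand]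
  | case2 cur rest chain checked r ih =>
    rw [pvExpand]
    rw [← ih]
    have := pvBfs_layer data (cur :: rest) [] chain checked
    simpa using this

-- ===== VERDICT (by name: the statement is the Claim_ definition above) =====
theorem build_evolution_chains_spec : Claim_equal_build_evolution_chains := by
  intro s d _
  unfold Spec_build_evolution_chains build_evolution_chains build_evolution_chains_alt
  exact pvBfs_eq_pvExpand d s _ _
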